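-- pv_equiv track=rewrite | github.com/rrossinni-exelixis/openstudybuilder-solution | studybuilder-import/importers/utils/api_bindings.py | get_all_identifiers_multiple
-- ===== SOURCE A (Python) =====
-- from typing import Sequence
--
-- def get_all_identifiers_multiple(
--     responses: list, identifier: str, values: Sequence[str]
-- ):
--     identifiers = {}
--     if responses is None:
--         return identifiers
--     for response_item in responses:
--         ident = response_item[identifier].lower()
--         if ident not in identifiers:
--             identifiers[ident] = []
--         requested_values = {}
--         for value in values:
--             requested_values[value] = response_item[value]
--         identifiers[ident].append(requested_values)
--     return identifiers
-- ===== SOURCE B (Python) =====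
-- def get_all_identifiers_multiple(
--     responses: list, identifier: str, values
-- ):
--     if responses is None:
--         return {}
--     keys = dict.fromkeys(item[identifier].lower() for item in responses)
--     return {
--         k: [
--             {v: item[v] for v in values}
--             for item in responses
--             if item[identifier].lower() == k
--         ]
--         for k in keys
--     }
-- ===== Notes on version B (the rewrite author's own statement) =====
-- stated objective: alternative
-- what changed: Replaces the incremental dict-grouping single pass (create-bucket-then-append per item) with a two-phase comprehension: first an ordered dedup of lowercased identifiers, then one dict comprehension that filters the responses per key.
import Mathlib
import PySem

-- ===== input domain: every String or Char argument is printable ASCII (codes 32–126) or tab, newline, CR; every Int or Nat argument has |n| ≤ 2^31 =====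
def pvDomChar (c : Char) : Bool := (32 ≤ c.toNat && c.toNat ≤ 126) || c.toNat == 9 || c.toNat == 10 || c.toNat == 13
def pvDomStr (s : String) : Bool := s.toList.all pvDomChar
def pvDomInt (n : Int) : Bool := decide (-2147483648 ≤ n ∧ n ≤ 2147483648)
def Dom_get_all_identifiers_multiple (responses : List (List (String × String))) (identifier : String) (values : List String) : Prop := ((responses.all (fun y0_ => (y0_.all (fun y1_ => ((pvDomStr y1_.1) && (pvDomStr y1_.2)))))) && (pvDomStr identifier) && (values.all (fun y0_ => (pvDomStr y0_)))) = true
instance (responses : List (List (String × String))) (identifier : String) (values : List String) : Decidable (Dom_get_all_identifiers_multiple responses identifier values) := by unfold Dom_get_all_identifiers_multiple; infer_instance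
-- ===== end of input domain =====

-- B replaces A's incremental dict-grouping pass (create bucket, then append, per item) by a two-phase
-- scheme: an ordered dedup of the lowercased identifiers, then one filtering comprehension per key
-- (objective: alternative decomposition, not faster). Equality is about the return value; neither mutates.

-- ===== PORT A =====
-- literal transliteration of A; the 'responses is None' guard has no counterpart (responses is a List here);
-- dict subscription response_item[...] is ported as getD with a dummy default — Pre_ excludes the KeyError inputs
def get_all_identifiers_multiple (responses : List (List (String × String))) (identifier : String) (values : List String) : List (String × List (List (String × String))) :=
  (responses.foldl
    (fun (identifiers : PySem.Dict String (List (List (String × String)))) response_item =>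
      let ident := PySem.Str.lower ((PySem.Dict.mk response_item).getD identifier "")
      let identifiers := if identifiers.contains ident then identifiers else identifiers.insert ident []
      let requested_values := values.foldl
        (fun (d : PySem.Dict String String) v => d.insert v ((PySem.Dict.mk response_item).getD v ""))
        PySem.Dict.empty
      identifiers.modify ident [] (fun l => l ++ [requested_values.items]))
    PySem.Dict.empty).items

-- ===== PORT B =====
def get_all_identifiers_multiple_alt (responses : List (List (String × String))) (identifier : String) (values : List String) : List (String × List (List (String × String))) :=
  let keys := PySem.List.dedup
    (responses.map (fun item => PySem.Str.lower ((PySem.Dict.mk item).getD identifier "")))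
  keys.map (fun k => (k,
    (responses.filter
        (fun item => PySem.Str.lower ((PySem.Dict.mk item).getD identifier "") == k)).map
      (fun item => (values.foldl
        (fun (d : PySem.Dict String String) v => d.insert v ((PySem.Dict.mk item).getD v ""))
        PySem.Dict.empty).items)))

-- ===== PRECONDITION & SPEC =====
-- Pre_ excludes exactly the inputs where the Python A raises KeyError: some response item lacking the
-- identifier key or one of the requested value keys.
def Pre_get_all_identifiers_multiple (responses : List (List (String × String))) (identifier : String) (values : List String) : Prop :=
  ∀ item ∈ responses,
    (PySem.Dict.mk item).contains identifier = true ∧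
    ∀ v ∈ values, (PySem.Dict.mk item).contains v = true
instance (responses : List (List (String × String))) (identifier : String) (values : List String) : Decidable (Pre_get_all_identifiers_multiple responses identifier values) := by unfold Pre_get_all_identifiers_multiple; infer_instance

def pvWitness_get_all_identifiers_multiple : (List (List (String × String))) × String × List String :=
  ([[("Id", "A"), ("x", "1")], [("Id", "a"), ("x", "2")]], "Id", ["x"])

def Spec_get_all_identifiers_multiple (responses : List (List (String × String))) (identifier : String) (values : List String) (out : List (String × List (List (String × String)))) : Prop := out = get_all_identifiers_multiple_alt responses identifier values
instance (responses : List (List (String × String))) (identifier : String) (values : List String) (out : List (String × List (List (String × String)))) : Decidable (Spec_get_all_identifiers_multiple responses identifier values out) := by unfold Spec_get_all_identifiers_multiple; infer_instance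

-- ===== CLAIM (what is proved, stated in full; the proofs are below) =====
def Claim_equal_get_all_identifiers_multiple : Prop := ∀ (responses : List (List (String × String))) (identifier : String) (values : List String), Dom_get_all_identifiers_multiple responses identifier values → Pre_get_all_identifiers_multiple responses identifier values → Spec_get_all_identifiers_multiple responses identifier values (get_all_identifiers_multiple responses identifier values)

-- ===== LEMMAS AND PROOFS =====

-- the lowercased grouping key of one response item
def pvKey (identifier : String) (item : List (String × String)) : String :=
  PySem.Str.lower ((PySem.Dict.mk item).getD identifier "")

-- the requested-values record extracted from one response item
def pvExt (values : List String) (item : List (String × String)) : List (String × String) :=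
  (values.foldl
    (fun (d : PySem.Dict String String) v => d.insert v ((PySem.Dict.mk item).getD v ""))
    PySem.Dict.empty).items

-- A's loop body ('create the bucket if absent, then append') is one Dict.modify
lemma stepA_eq_modify (identifier : String) (values : List String)
    (d : PySem.Dict String (List (List (String × String)))) (item : List (String × String)) :
    (let ident := PySem.Str.lower ((PySem.Dict.mk item).getD identifier "")
     let d' := if d.contains ident then d else d.insert ident []
     d'.modify ident [] (fun l => l ++ [pvExt values item]))
    = d.modify (pvKey identifier item) [] (fun l => l ++ [pvExt values item]) := by
  simp only [pvKey]
  by_cases h : d.contains (PySem.Str.lower ((PySem.Dict.mk item).getD identifier "")) = true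
  · simp [h]
  · have h' : d.contains (PySem.Str.lower ((PySem.Dict.mk item).getD identifier "")) = false := by
      simpa using h
    simp [h', PySem.Dict.modify, PySem.Dict.getD_insert_self, PySem.Dict.insert_insert_self,
      PySem.Dict.getD_of_not_contains d _ h']

lemma ports_agree (responses : List (List (String × String))) (identifier : String) (values : List String) :
    get_all_identifiers_multiple responses identifier values
    = get_all_identifiers_multiple_alt responses identifier values := by
  unfold get_all_identifiers_multiple get_all_identifiers_multiple_alt
  -- rewrite A's fold body to a single modify, then to a fold over (key, extract) pairs
  have h1 : (responses.foldl
      (fun (identifiers : PySem.Dict String (List (List (String × String)))) response_item =>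
        let ident := PySem.Str.lower ((PySem.Dict.mk response_item).getD identifier "")
        let identifiers := if identifiers.contains ident then identifiers else identifiers.insert ident []
        let requested_values := values.foldl
          (fun (d : PySem.Dict String String) v => d.insert v ((PySem.Dict.mk response_item).getD v ""))
          PySem.Dict.empty
        identifiers.modify ident [] (fun l => l ++ [requested_values.items]))
      PySem.Dict.empty)
      = (responses.map (fun item => (pvKey identifier item, pvExt values item))).foldl
          (fun d p => d.modify p.1 [] (fun l => l ++ [p.2])) PySem.Dict.empty := by
    rw [List.foldl_map]
    exact PySem.List.foldl_congr_mem _ _ _ _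
      (fun d item _ => stepA_eq_modify identifier values d item)
  rw [h1]
  set D := (responses.map (fun item => (pvKey identifier item, pvExt values item))).foldl
      (fun d p => d.modify p.1 [] (fun l => l ++ [p.2])) PySem.Dict.empty with hD
  have hnodup : D.keys.Nodup := by
    rw [hD]
    exact PySem.Dict.nodup_keys_foldl_modify_key _ Prod.fst []
      (fun _ p => (fun l => l ++ [p.2])) PySem.Dict.empty (by simp [PySem.Dict.empty])
  have hkeys : D.keys = PySem.List.dedup
      (responses.map (fun item => PySem.Str.lower ((PySem.Dict.mk item).getD identifier ""))) := by
    rw [hD, PySem.Dict.keys_foldl_modify_key _ Prod.fst [] (fun _ p => (fun l => l ++ [p.2]))]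
    simp [PySem.Set.update_nil_left, PySem.Dict.empty, List.map_map, Function.comp_def, pvKey]
  rw [PySem.Dict.items_eq_map_keys D hnodup [], hkeys]
  refine List.map_congr_left (fun k _ => ?_)
  congr 1
  rw [hD, PySem.Dict.getD_foldl_modify_append, PySem.Dict.getD_empty]
  rw [List.filter_map, List.map_map]
  simp [Function.comp_def, pvKey, pvExt]

-- ===== VERDICT (by name: the statement is the Claim_ definition above) =====
theorem get_all_identifiers_multiple_spec : Claim_equal_get_all_identifiers_multiple := by
  intro responses identifier values _ _
  exact ports_agree responses identifier values
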